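-- pv_equiv track=rewrite | github.com/thiesgehrmann/proteny | utils/util.py | chr_pair_group
-- ===== SOURCE A (Python) =====
-- def chr_pair_group(hits):
--   """HC = chr_pair_group(H)
--      H: Output list from sort_org
--
--      Group hits by chromosomes they exist on
--      NOTE: DOES NOT PRESERVE INDICES OF O LISTS!
--      Outputs:
--        HC: A dictionary of hits per pair of chromosomes
--   """
--
--   H_chrs = {};
--
--   for (i, hit) in enumerate(hits):
--     a_chr1 = hit[1];
--     a_chr2 = hit[4];
--     k = (a_chr1, a_chr2);
--     if k not in H_chrs:
--       H_chrs[k] = [];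
--     #fi
--     H_chrs[k].append(i);
--   #efor
--
--   return H_chrs;
-- ===== SOURCE B (Python) =====
-- def chr_pair_group(hits):
--   keys = dict.fromkeys((hit[1], hit[4]) for hit in hits)
--   return {k: [i for i, hit in enumerate(hits) if (hit[1], hit[4]) == k]
--           for k in keys}
-- ===== Notes on version B (the rewrite author's own statement) =====
-- stated objective: alternative
-- what changed: Replaces the incremental dict-of-lists accumulator with a two-phase decomposition: an ordered dedup of the chromosome-pair keys (dict.fromkeys) followed by a dict comprehension that collects each key's indices with its own scan over enumerate(hits).
import Mathlib
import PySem

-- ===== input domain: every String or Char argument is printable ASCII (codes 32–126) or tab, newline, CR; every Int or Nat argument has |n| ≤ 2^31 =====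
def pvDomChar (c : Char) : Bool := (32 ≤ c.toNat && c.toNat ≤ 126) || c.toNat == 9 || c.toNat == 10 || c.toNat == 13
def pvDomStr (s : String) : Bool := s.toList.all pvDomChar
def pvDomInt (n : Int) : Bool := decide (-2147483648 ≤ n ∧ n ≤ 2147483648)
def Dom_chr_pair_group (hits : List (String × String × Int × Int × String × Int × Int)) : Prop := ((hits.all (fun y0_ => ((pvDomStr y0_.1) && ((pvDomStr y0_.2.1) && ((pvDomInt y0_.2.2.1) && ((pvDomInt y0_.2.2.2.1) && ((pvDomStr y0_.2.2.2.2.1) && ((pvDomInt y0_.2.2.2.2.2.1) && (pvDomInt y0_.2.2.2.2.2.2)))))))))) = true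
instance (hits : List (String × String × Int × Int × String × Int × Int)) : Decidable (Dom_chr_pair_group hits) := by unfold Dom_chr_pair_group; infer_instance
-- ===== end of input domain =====

-- B replaces A's one-pass dict-of-lists accumulator with an ordered key dedup followed by a
-- per-key index-collecting comprehension (alternative decomposition; not claimed faster).

-- ===== PORT A =====
-- one pass: dict H_chrs; for each (i, hit): k = (hit[1], hit[4]); add [] if absent; append i
def chr_pair_group (hits : List (String × String × Int × Int × String × Int × Int)) : List (String × String × List Int) :=
  let H_chrs : PySem.Dict (String × String) (List Int) :=
    (PySem.List.enumerate hits 0).foldl (fun H_chrs p =>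
      let a_chr1 := p.2.2.1
      let a_chr2 := p.2.2.2.2.2.1
      let k := (a_chr1, a_chr2)
      let H_chrs := if H_chrs.contains k then H_chrs else H_chrs.insert k []
      H_chrs.modify k [] (fun l => l ++ [p.1])) PySem.Dict.empty
  -- returned dict as an association list, flattened to the required triple type
  H_chrs.items.map (fun q => (q.1.1, q.1.2, q.2))

-- ===== PORT B =====
-- keys = dict.fromkeys(...) (ordered dedup); then one comprehension scan per key
def chr_pair_group_alt (hits : List (String × String × Int × Int × String × Int × Int)) : List (String × String × List Int) :=
  let keys := PySem.List.dedup (hits.map (fun hit => (hit.2.1, hit.2.2.2.2.1)))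
  keys.map (fun k => (k.1, k.2,
    ((PySem.List.enumerate hits 0).filter (fun p => (p.2.2.1, p.2.2.2.2.2.1) == k)).map (·.1)))

-- ===== PRECONDITION & SPEC =====
def Spec_chr_pair_group (hits : List (String × String × Int × Int × String × Int × Int)) (out : List (String × String × List Int)) : Prop := out = chr_pair_group_alt hits
instance (hits : List (String × String × Int × Int × String × Int × Int)) (out : List (String × String × List Int)) : Decidable (Spec_chr_pair_group hits out) := by unfold Spec_chr_pair_group; infer_instance

-- ===== CLAIM (what is proved, stated in full; the proofs are below) =====
def Claim_equal_chr_pair_group : Prop := ∀ (hits : List (String × String × Int × Int × String × Int × Int)), Dom_chr_pair_group hits → Spec_chr_pair_group hits (chr_pair_group hits)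

-- ===== LEMMAS AND PROOFS =====

-- A's loop body ('insert [] if absent, then append') is extensionally the single dict step
-- 'modify k [] (· ++ [i])' (PySem.Dict.modify is exactly d[k] = f(d.get(k, dflt))).
theorem pv_stepA_eq_modify :
    (fun (d : PySem.Dict (String × String) (List Int))
         (p : Int × (String × String × Int × Int × String × Int × Int)) =>
      let a_chr1 := p.2.2.1
      let a_chr2 := p.2.2.2.2.2.1
      let k := (a_chr1, a_chr2)
      let d := if d.contains k then d else d.insert k []
      d.modify k [] (fun l => l ++ [p.1]))
    = (fun d p => d.modify (p.2.2.1, p.2.2.2.2.2.1) [] (fun l => l ++ [p.1])) := by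
  funext d p
  by_cases h : d.contains (p.2.2.1, p.2.2.2.2.2.1)
  · simp [h]
  · have h' : d.contains (p.2.2.1, p.2.2.2.2.2.1) = false := by simpa using h
    simp only [h', Bool.false_eq_true, if_false, PySem.Dict.modify,
      PySem.Dict.insert_insert_self, PySem.Dict.getD_insert_self,
      PySem.Dict.getD_of_not_contains d [] h', List.nil_append]

-- the whole 'modify' loop, characterised: items = deduped keys paired with their index lists
theorem pv_items (l : List (Int × (String × String × Int × Int × String × Int × Int))) :
    (l.foldl (fun d p => d.modify (p.2.2.1, p.2.2.2.2.2.1) [] (fun v => v ++ [p.1]))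
        PySem.Dict.empty).items
    = (PySem.List.dedup (l.map (fun p => ((p.2.2.1, p.2.2.2.2.2.1) : String × String)))).map
        (fun c => (c, (l.filter (fun p => (p.2.2.1, p.2.2.2.2.2.1) == c)).map (·.1))) := by
  have hnd := PySem.Dict.nodup_keys_foldl_modify_key l
      (fun p => ((p.2.2.1, p.2.2.2.2.2.1) : String × String)) []
      (fun _ p => fun v => v ++ [p.1]) PySem.Dict.empty PySem.Dict.nodup_keys_empty
  have hkeys := PySem.Dict.keys_foldl_modify_key l
      (fun p => ((p.2.2.1, p.2.2.2.2.2.1) : String × String)) []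
      (fun _ p => fun v => v ++ [p.1]) PySem.Dict.empty
  rw [PySem.Dict.keys_empty, PySem.Set.update_nil_left] at hkeys
  rw [PySem.Dict.items_eq_map_keys _ hnd [], hkeys]
  refine List.map_congr_left (fun c _ => ?_)
  have hfold : (l.foldl (fun d p => d.modify (p.2.2.1, p.2.2.2.2.2.1) [] (fun v => v ++ [p.1]))
        (PySem.Dict.empty : PySem.Dict (String × String) (List Int)))
      = ((l.map (fun p => (((p.2.2.1, p.2.2.2.2.2.1) : String × String), p.1))).foldl
          (fun d q => d.modify q.1 [] (fun v => v ++ [q.2])) PySem.Dict.empty) := by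
    rw [List.foldl_map]
  rw [hfold, PySem.Dict.getD_foldl_modify_append, PySem.Dict.getD_empty,
      List.filter_map, List.map_map, List.nil_append]
  rfl

-- ===== VERDICT (by name: the statement is the Claim_ definition above) =====
theorem chr_pair_group_spec : Claim_equal_chr_pair_group := by
  intro hits _
  unfold Spec_chr_pair_group chr_pair_group chr_pair_group_alt
  simp only [pv_stepA_eq_modify, pv_items, List.map_map]
  have hmap : (PySem.List.enumerate hits 0).map
        (fun p => ((p.2.2.1, p.2.2.2.2.2.1) : String × String))
      = hits.map (fun hit => ((hit.2.1, hit.2.2.2.2.1) : String × String)) := by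
    rw [show (fun (p : Int × (String × String × Int × Int × String × Int × Int)) =>
          ((p.2.2.1, p.2.2.2.2.2.1) : String × String))
        = (fun hit => ((hit.2.1, hit.2.2.2.2.1) : String × String)) ∘ Prod.snd from rfl,
       ← List.map_map, PySem.List.map_snd_enumerate]
  rw [hmap]
  rfl
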